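-- pv_equiv track=rewrite | github.com/hoahai/fastapi | apps/tradsphere/api/v1/helpers/schedulesPdf.py | _build_month_groups
-- ===== SOURCE A (Python) =====
-- def _build_month_groups(week_defs: list[dict[str, str]]) -> list[tuple[str, int]]:
--     groups: list[tuple[str, int]] = []
--     for week in week_defs:
--         month_label = str(week.get("monthLabel") or "Weeks")
--         if groups and groups[-1][0] == month_label:
--             groups[-1] = (month_label, groups[-1][1] + 1)
--         else:
--             groups.append((month_label, 1))
--     return groups
-- ===== SOURCE B (Python) =====
-- def _build_month_groups(week_defs: list[dict[str, str]]) -> list[tuple[str, int]]: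
--     # Boundary-index algorithm: never merges runs; find where labels change, then
--     # read off each group's length as the difference of adjacent boundary indices.
--     labels = [str(week.get("monthLabel") or "Weeks") for week in week_defs]
--     n = len(labels)
--     starts = [i for i in range(n) if i == 0 or labels[i] != labels[i - 1]]
--     return [(labels[s], e - s) for s, e in zip(starts, starts[1:] + [n])]
-- ===== Notes on version B (the rewrite author's own statement) =====
-- stated objective: alternative
-- what changed: Replaced A's run-merging accumulator (extend or append the last group per element) with a boundary-index algorithm: map labels, collect the indices where the label changes, and read each group's length off as the difference of adjacent boundary indices.
import Mathlib
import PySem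

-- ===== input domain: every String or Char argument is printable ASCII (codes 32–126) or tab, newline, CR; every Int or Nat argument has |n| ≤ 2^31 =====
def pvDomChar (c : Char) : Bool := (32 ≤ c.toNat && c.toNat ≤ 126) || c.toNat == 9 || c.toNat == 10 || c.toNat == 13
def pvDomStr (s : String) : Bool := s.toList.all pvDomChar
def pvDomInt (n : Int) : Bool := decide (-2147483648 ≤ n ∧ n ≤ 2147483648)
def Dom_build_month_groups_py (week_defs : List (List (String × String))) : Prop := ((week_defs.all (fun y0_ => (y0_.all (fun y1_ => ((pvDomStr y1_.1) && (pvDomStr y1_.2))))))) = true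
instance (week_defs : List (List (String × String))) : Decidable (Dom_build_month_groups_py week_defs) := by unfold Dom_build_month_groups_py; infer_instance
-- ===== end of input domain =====

-- B replaces A's run-merging accumulator with a boundary-index algorithm (label-change indices, lengths by index subtraction); alternative decomposition, same cost.

-- ===== PORT A =====
-- str(week.get("monthLabel") or "Weeks"): the dict value when present and truthy (non-empty), else "Weeks"
def pvLabel (week : List (String × String)) : String :=
  match (PySem.Dict.mk week).get? "monthLabel" with
  | some s => if s = "" then "Weeks" else s
  | none => "Weeks"

def build_month_groups_py (week_defs : List (List (String × String))) : List (String × Int) :=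
  week_defs.foldl (fun groups week =>
    let month_label := pvLabel week
    match groups.getLast? with
    | some last =>
        if last.1 = month_label then groups.dropLast ++ [(month_label, last.2 + 1)]
        else groups ++ [(month_label, 1)]
    | none => groups ++ [(month_label, 1)]) []

-- ===== PORT B =====
-- i == 0 or labels[i] != labels[i-1]  (only evaluated at in-range i)
def pvIsStart (labels : List String) (i : Nat) : Bool :=
  i == 0 || labels.getD i "" != labels.getD (i - 1) ""

-- [i for i in range(n) if i == 0 or labels[i] != labels[i-1]]
def pvStarts (labels : List String) : List Nat :=
  (List.range labels.length).filter (pvIsStart labels)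

def build_month_groups_py_alt (week_defs : List (List (String × String))) : List (String × Int) :=
  let labels := week_defs.map pvLabel
  let starts := pvStarts labels
  (starts.zip (starts.drop 1 ++ [labels.length])).map
    (fun p => (labels.getD p.1 "", (p.2 : Int) - (p.1 : Int)))

-- ===== PRECONDITION & SPEC =====
def Spec_build_month_groups_py (week_defs : List (List (String × String))) (out : List (String × Int)) : Prop := out = build_month_groups_py_alt week_defs
instance (week_defs : List (List (String × String))) (out : List (String × Int)) : Decidable (Spec_build_month_groups_py week_defs out) := by unfold Spec_build_month_groups_py; infer_instance

-- ===== CLAIM (what is proved, stated in full; the proofs are below) =====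
def Claim_equal_build_month_groups_py : Prop := ∀ (week_defs : List (List (String × String))), Dom_build_month_groups_py week_defs → Spec_build_month_groups_py week_defs (build_month_groups_py week_defs)

-- ===== LEMMAS AND PROOFS =====

-- Common reference form: run-length encoding of the label list
def pvRle : List String → List (String × Int)
  | [] => []
  | l :: rest =>
      (l, 1 + ((rest.takeWhile (· = l)).length : Int)) :: pvRle (rest.dropWhile (· = l))
termination_by ls => ls.length
decreasing_by
  simp only [List.length_cons]
  exact Nat.lt_succ_of_le (List.length_dropWhile_le _ _)

-- A's loop body, abstracted over the already-normalized label
def pvStep (groups : List (String × Int)) (m : String) : List (String × Int) :=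
  match groups.getLast? with
  | some last =>
      if last.1 = m then groups.dropLast ++ [(m, last.2 + 1)]
      else groups ++ [(m, 1)]
  | none => groups ++ [(m, 1)]

-- A's fold, restarted from a nonempty accumulator whose open (last) group is (m, k)
def pvAux (m : String) (k : Int) : List String → List (String × Int)
  | [] => [(m, k)]
  | l :: ls => if m = l then pvAux m (k + 1) ls else (m, k) :: pvAux l 1 ls

theorem pvFoldA (ls : List String) : ∀ (g : List (String × Int)) (m : String) (k : Int),
    ls.foldl pvStep (g ++ [(m, k)]) = g ++ pvAux m k ls := by
  induction ls with
  | nil => intro g m k; simp [pvAux]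
  | cons l ls ih =>
    intro g m k
    simp only [List.foldl_cons, pvAux]
    by_cases h : m = l
    · subst h
      have hstep : pvStep (g ++ [(m, k)]) m = g ++ [(m, k + 1)] := by
        simp [pvStep]
      rw [hstep, ih, if_pos rfl]
    · have hstep : pvStep (g ++ [(m, k)]) l = (g ++ [(m, k)]) ++ [(l, 1)] := by
        simp [pvStep, h]
      rw [hstep, ih (g ++ [(m, k)]) l 1]
      simp [h]

theorem pvAux_rle (ls : List String) : ∀ (m : String) (k : Int),
    pvAux m k ls = (m, k + ((ls.takeWhile (· = m)).length : Int)) :: pvRle (ls.dropWhile (· = m)) := by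
  induction ls with
  | nil => intro m k; simp [pvAux, pvRle]
  | cons l ls ih =>
    intro m k
    by_cases h : m = l
    · subst h
      simp only [pvAux, List.takeWhile_cons, List.dropWhile_cons]
      rw [ih]
      simp
      ring_nf
    · simp only [pvAux, if_neg h, List.takeWhile_cons, List.dropWhile_cons]
      have h' : ¬ (l = m) := fun e => h e.symm
      simp only [h', decide_false, if_neg, Bool.false_eq_true, not_false_eq_true]
      rw [ih l 1]
      simp [pvRle]

theorem pvA_eq_rle (labels : List String) : labels.foldl pvStep [] = pvRle labels := by
  cases labels with
  | nil => simp [pvRle]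
  | cons l ls =>
    simp only [List.foldl_cons]
    have h0 : pvStep [] l = [] ++ [(l, 1)] := by simp [pvStep]
    rw [h0, pvFoldA ls [] l 1, pvAux_rle ls l 1]
    simp [pvRle]

-- every element of takeWhile (· = l) equals l
theorem pvTake_all (l x : String) (rest : List String)
    (hx : x ∈ rest.takeWhile (· = l)) : x = l := by
  have := List.mem_takeWhile_imp hx
  simpa using this

-- head of dropWhile (· = l) differs from l
theorem pvDrop_head (l h : String) (rest tl : List String)
    (hd : rest.dropWhile (· = l) = h :: tl) : ¬ (h = l) := by
  induction rest with
  | nil => simp at hd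
  | cons r rs ih =>
    rw [List.dropWhile_cons] at hd
    split at hd
    · exact ih hd
    · next hq =>
      injection hd with hrh _
      subst hrh
      simpa using hq

-- getD of l :: (t ++ d) past the run: index (t.length + j) + 1 lands in d
theorem pvGetD_shift (l : String) (t d : List String) (j : Nat) :
    (l :: (t ++ d)).getD (t.length + j + 1) "" = d.getD j "" := by
  rw [List.getD_cons_succ]
  rcases Nat.lt_or_ge (t.length + j) (t ++ d).length with h | h
  · rw [List.getD_eq_getElem _ _ h, List.getElem_append_right (by omega),
        List.getD_eq_getElem]
    · congr 1; omega
    · simp at h; omega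
  · rw [List.getD_eq_default _ _ h, List.getD_eq_default]
    simp at h; omega

-- getD of l :: (t ++ d) inside the run (index ≤ t.length) is l
theorem pvGetD_run (l : String) (t d : List String) (i : Nat) (hi : i ≤ t.length)
    (ht : ∀ x ∈ t, x = l) : (l :: (t ++ d)).getD i "" = l := by
  cases i with
  | zero => rfl
  | succ k =>
    rw [List.getD_cons_succ]
    have hk : k < t.length := by omega
    rw [List.getD_eq_getElem _ _ (by simp; omega), List.getElem_append_left hk]
    exact ht _ (List.getElem_mem _)

-- boundary structure of the starts list: 0, then the starts of the tail run shifted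
theorem pvStarts_cons (l : String) (rest : List String) :
    pvStarts (l :: rest) =
      0 :: (pvStarts (rest.dropWhile (· = l))).map
        (fun j => (rest.takeWhile (· = l)).length + 1 + j) := by
  set t := rest.takeWhile (· = l) with htdef
  set d := rest.dropWhile (· = l) with hddef
  have htd : t ++ d = rest := List.takeWhile_append_dropWhile
  have hrest : (l :: rest).length = (t.length + 1) + d.length := by
    simp [← htd]; omega
  have hall : ∀ x ∈ t, x = l := fun x hx => pvTake_all l x rest hx
  have hshift : ∀ j, rest.getD (t.length + j) "" = d.getD j "" := by
    intro j
    rw [← htd]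
    have := pvGetD_shift l t d j
    rwa [List.getD_cons_succ] at this
  have hrun : ∀ i, i ≤ t.length → (l :: rest).getD i "" = l := by
    intro i hi
    rw [← htd]
    exact pvGetD_run l t d i hi hall
  unfold pvStarts
  rw [hrest, List.range_add, List.filter_append]
  have h1 : (List.range (t.length + 1)).filter (pvIsStart (l :: rest)) = [0] := by
    rw [List.range_succ_eq_map, List.filter_cons]
    have h0 : pvIsStart (l :: rest) 0 = true := by simp [pvIsStart]
    rw [if_pos h0, List.filter_map, List.filter_eq_nil_iff.mpr, List.map_nil]
    intro i hi
    have hi' : i < t.length := List.mem_range.mp hi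
    have f1 : (l :: rest).getD (i + 1) "" = l := hrun (i + 1) (by omega)
    have f2 : (l :: rest).getD i "" = l := hrun i (by omega)
    simp only [Function.comp_apply, pvIsStart, Nat.succ_eq_add_one, Nat.add_sub_cancel]
    rw [f1, f2]
    simp
  have h2 : (List.filter (pvIsStart (l :: rest))
        ((List.range d.length).map (fun x => t.length + 1 + x))) =
      ((List.range d.length).filter (pvIsStart d)).map (fun j => t.length + 1 + j) := by
    rw [List.filter_map]
    congr 1
    apply List.filter_congr
    intro j hj
    have hj' : j < d.length := List.mem_range.mp hj
    simp only [Function.comp_apply, pvIsStart]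
    cases j with
    | zero =>
      obtain ⟨h0, tl, hd0⟩ : ∃ h0 tl, d = h0 :: tl := by
        cases hdd : d with
        | nil => rw [hdd] at hj'; simp at hj'
        | cons a b => exact ⟨a, b, rfl⟩
      have g1 : (l :: rest).getD (t.length + 1) "" = h0 := by
        rw [List.getD_cons_succ]
        have := hshift 0
        rw [Nat.add_zero] at this
        rw [this, hd0]
        rfl
      have g2 : (l :: rest).getD t.length "" = l := hrun t.length le_rfl
      have hne : ¬ (h0 = l) := pvDrop_head l h0 rest tl (by rw [← hddef]; exact hd0)
      simp only [Nat.add_zero, Nat.add_sub_cancel]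
      rw [g1, g2]
      simp [hne]
    | succ k =>
      have i1 : t.length + 1 + (k + 1) = t.length + (k + 1) + 1 := by omega
      have i2 : t.length + (k + 1) + 1 - 1 = t.length + k + 1 := by omega
      have q1 : (l :: rest).getD (t.length + (k + 1) + 1) "" = d.getD (k + 1) "" := by
        rw [List.getD_cons_succ]
        exact hshift (k + 1)
      have q2 : (l :: rest).getD (t.length + k + 1) "" = d.getD k "" := by
        rw [List.getD_cons_succ]
        exact hshift k
      rw [i1, i2, q1, q2]
      simp
  rw [h1, h2]
  rfl

-- if d is nonempty its starts list begins with 0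
theorem pvStarts_head (h : String) (tl : List String) :
    ∃ s, pvStarts (h :: tl) = 0 :: s := by
  unfold pvStarts
  rw [List.length_cons, List.range_succ_eq_map, List.filter_cons]
  have h0 : pvIsStart (h :: tl) 0 = true := by simp [pvIsStart]
  rw [if_pos h0]
  exact ⟨_, rfl⟩

-- shifting both index lists by n leaves the produced groups unchanged
theorem pvZipShift (labels d : List String) (n : Nat) (s e : List Nat)
    (hx : ∀ x ∈ s, labels.getD (n + x) "" = d.getD x "") :
    ((s.map (fun j => n + j)).zip (e.map (fun j => n + j))).map
        (fun p => (labels.getD p.1 "", (p.2 : Int) - (p.1 : Int))) =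
      (s.zip e).map (fun p => (d.getD p.1 "", (p.2 : Int) - (p.1 : Int))) := by
  rw [List.zip_map, List.map_map]
  apply List.map_congr_left
  intro p hp
  obtain ⟨a, b⟩ := p
  obtain ⟨hp1, -⟩ := List.of_mem_zip hp
  simp only [Function.comp_apply, Prod.map, Prod.mk.injEq]
  refine ⟨by rw [hx a hp1], by push_cast; ring⟩

theorem pvB_eq_rle (labels : List String) :
    ((pvStarts labels).zip ((pvStarts labels).drop 1 ++ [labels.length])).map
      (fun p => (labels.getD p.1 "", (p.2 : Int) - (p.1 : Int))) = pvRle labels := by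
  induction labels using pvRle.induct with
  | case1 => simp [pvStarts, pvRle]
  | case2 l rest ih =>
    set t := rest.takeWhile (· = l) with htdef
    set d := rest.dropWhile (· = l) with hddef
    have htd : t ++ d = rest := List.takeWhile_append_dropWhile
    have hall : ∀ x ∈ t, x = l := fun x hx => pvTake_all l x rest hx
    have hlen : (l :: rest).length = t.length + 1 + d.length := by
      simp [← htd]; omega
    have hget0 : (l :: rest).getD 0 "" = l := rfl
    have hr : pvRle (l :: rest) = (l, 1 + (t.length : Int)) :: pvRle d := by
      rw [pvRle]
    have hx : ∀ x ∈ pvStarts d, (l :: rest).getD (t.length + 1 + x) "" = d.getD x "" := by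
      intro x _
      rw [← htd]
      have := pvGetD_shift l t d x
      have harith : t.length + x + 1 = t.length + 1 + x := by omega
      rw [harith] at this
      exact this
    rw [pvStarts_cons l rest, ← htdef, ← hddef]
    by_cases hd0 : d = []
    · have hs : pvStarts d = [] := by rw [hd0]; rfl
      have hlen0 : (l :: rest).length = t.length + 1 := by rw [hlen, hd0]; simp
      rw [hs, hlen0, hr, hd0]
      simp [pvRle, Prod.mk.injEq]
      ring
    · obtain ⟨h0, tl, hdc⟩ : ∃ h0 tl, d = h0 :: tl := by
        cases hdd : d with
        | nil => exact absurd hdd hd0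
        | cons a b => exact ⟨a, b, rfl⟩
      obtain ⟨s'', hs''⟩ := pvStarts_head h0 tl
      have hs : pvStarts d = 0 :: s'' := by rw [hdc]; exact hs''
      rw [hs] at ih ⊢
      simp only [List.drop_succ_cons, List.drop_zero] at ih
      have hz := pvZipShift (l :: rest) d (t.length + 1) (0 :: s'') (s'' ++ [d.length])
        (by rw [← hs]; exact hx)
      rw [ih] at hz
      simp only [List.map_cons] at hz ⊢
      simp only [List.drop_succ_cons, List.drop_zero]
      rw [hlen]
      have htail : (s''.map (fun j => t.length + 1 + j)) ++ [t.length + 1 + d.length] =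
          (s'' ++ [d.length]).map (fun j => t.length + 1 + j) := by simp
      rw [List.cons_append, List.zip_cons_cons, List.map_cons, htail, hz, hr]
      congr 1
      simp only [Prod.mk.injEq, hget0]
      exact ⟨trivial, by push_cast; ring⟩

-- ===== VERDICT (by name: the statement is the Claim_ definition above) =====
theorem build_month_groups_py_spec : Claim_equal_build_month_groups_py := by
  intro week_defs _
  unfold Spec_build_month_groups_py build_month_groups_py build_month_groups_py_alt
  have hA : week_defs.foldl (fun groups week => pvStep groups (pvLabel week)) [] =
      pvRle (week_defs.map pvLabel) := by
    rw [← pvA_eq_rle, ← List.foldl_map]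
  have hB := pvB_eq_rle (week_defs.map pvLabel)
  simp only at hB ⊢
  rw [← hB] at hA
  simpa [pvStep] using hA
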